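-- pv_equiv track=rewrite | github.com/dbconfession78/interview_prep | leetcode/475-heaters.py | heater_rad
-- ===== SOURCE A (Python) =====
-- def heater_rad(houses, heaters):
--     houses.sort()
--     heaters.sort()
--     i = 0
--     j = 0
--     res = 0
--     while i < len(houses):
--         while j < len(heaters)-1 and abs(heaters[j + 1] - houses[i]) <= abs(heaters[j] - houses[i]):
--             j += 1
--         res = max(res, abs(heaters[j] - houses[i]))
--         i += 1
--     return res
-- ===== SOURCE B (Python) =====
-- def heater_rad(houses, heaters):
--     houses.sort()
--     heaters.sort()
--     if not houses:
--         return 0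
--     return max(min(abs(ht - h) for ht in heaters) for h in houses)
-- ===== Notes on version B (the rewrite author's own statement) =====
-- stated objective: simpler
-- what changed: A's stateful two-pointer sweep (an inner while advancing a shared heater index across houses) is replaced by a direct max-of-min-distances expression: for each house take the minimum absolute distance over all heaters, return the maximum.
import Mathlib
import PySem

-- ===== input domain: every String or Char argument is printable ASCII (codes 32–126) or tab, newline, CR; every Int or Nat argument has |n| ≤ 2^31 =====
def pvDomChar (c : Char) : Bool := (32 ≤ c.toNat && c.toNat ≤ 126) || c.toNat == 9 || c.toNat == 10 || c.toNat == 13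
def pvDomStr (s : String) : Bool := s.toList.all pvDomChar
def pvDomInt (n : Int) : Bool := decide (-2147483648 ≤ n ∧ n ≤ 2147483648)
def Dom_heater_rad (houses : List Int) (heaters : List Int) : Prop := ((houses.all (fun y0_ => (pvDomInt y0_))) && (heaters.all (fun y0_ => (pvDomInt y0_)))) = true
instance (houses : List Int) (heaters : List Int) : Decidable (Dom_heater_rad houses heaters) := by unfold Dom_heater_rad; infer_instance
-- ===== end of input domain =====

-- B replaces A's stateful two-pointer sweep by a direct max-of-min-distances expression (simpler,
-- not faster). Both programs sort their arguments in place; the equivalence proved is about the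
-- return value (the in-place sorts are identical in A and B).

-- ===== PORT A =====
-- inner 'while j < len(heaters)-1 and abs(heaters[j+1]-houses[i]) <= abs(heaters[j]-houses[i]): j += 1'
-- indices are produced by the loop itself and are nonneg; getD is exact whenever j < length
-- (guaranteed inside Pre_; outside Pre_ the Python raises IndexError).
def heaterInner (S : List Int) (x : Int) (j : Nat) : Nat :=
  if _h : j + 1 < S.length ∧ |S.getD (j+1) 0 - x| ≤ |S.getD j 0 - x| then
    heaterInner S x (j+1)
  else j
termination_by S.length - j
decreasing_by omega

-- outer 'while i < len(houses): … res = max(res, abs(heaters[j]-houses[i])); i += 1'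
def heaterLoop (S : List Int) (H : List Int) (j : Nat) (res : Int) : Int :=
  match H with
  | [] => res
  | x :: rest =>
      let j' := heaterInner S x j
      heaterLoop S rest j' (max res |S.getD j' 0 - x|)

def heater_rad (houses : List Int) (heaters : List Int) : Int :=
  heaterLoop (PySem.List.sorted heaters (fun x => x) false) (PySem.List.sorted houses (fun x => x) false) 0 0

-- ===== PORT B =====
-- min(abs(ht - h) for ht in heaters); .getD 0 is unreachable inside Pre_ (heaters nonempty there)
def heaterBest (heaters : List Int) (h : Int) : Int :=
  (PySem.List.min? (heaters.map (fun ht => |ht - h|)) (fun y => y)).getD 0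

def heater_rad_alt (houses : List Int) (heaters : List Int) : Int :=
  let hs := PySem.List.sorted houses (fun x => x) false
  let ss := PySem.List.sorted heaters (fun x => x) false
  if hs = [] then 0
  else (PySem.List.max? (hs.map (fun h => heaterBest ss h)) (fun y => y)).getD 0

-- ===== PRECONDITION & SPEC =====
-- Pre_ excludes exactly the inputs where Python A raises IndexError (heaters empty while houses
-- nonempty; Python B raises ValueError there too).
def Pre_heater_rad (houses : List Int) (heaters : List Int) : Prop :=
  houses = [] ∨ heaters ≠ []
instance (houses : List Int) (heaters : List Int) : Decidable (Pre_heater_rad houses heaters) := by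
  unfold Pre_heater_rad; infer_instance
def pvWitness_heater_rad : List Int × List Int := ([1, 5, 2], [4, 0])

def Spec_heater_rad (houses : List Int) (heaters : List Int) (out : Int) : Prop := out = heater_rad_alt houses heaters
instance (houses : List Int) (heaters : List Int) (out : Int) : Decidable (Spec_heater_rad houses heaters out) := by unfold Spec_heater_rad; infer_instance

-- ===== CLAIM (what is proved, stated in full; the proofs are below) =====
def Claim_equal_heater_rad : Prop := ∀ (houses : List Int) (heaters : List Int), Dom_heater_rad houses heaters → Pre_heater_rad houses heaters → Spec_heater_rad houses heaters (heater_rad houses heaters)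

-- ===== LEMMAS AND PROOFS =====

-- |b-x| > |a-x| propagates to any c ≥ b (sorted tail is only farther once distance grew)
lemma pv_abs_grow (a b c x : Int) (hab : a ≤ b) (hbc : b ≤ c)
    (h : |a - x| < |b - x|) : |a - x| < |c - x| := by
  rcases abs_cases (a - x) with ⟨h1, _⟩ | ⟨h1, _⟩ <;>
  rcases abs_cases (b - x) with ⟨h2, _⟩ | ⟨h2, _⟩ <;>
  rcases abs_cases (c - x) with ⟨h3, _⟩ | ⟨h3, _⟩ <;> omega

-- if the larger point b is at least as close as a for x, it stays so for every x' ≥ x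
lemma pv_abs_shift (a b x x' : Int) (hab : a ≤ b) (hx : x ≤ x')
    (h : |b - x| ≤ |a - x|) : |b - x'| ≤ |a - x'| := by
  rcases abs_cases (a - x) with ⟨h1, _⟩ | ⟨h1, _⟩ <;>
  rcases abs_cases (b - x) with ⟨h2, _⟩ | ⟨h2, _⟩ <;>
  rcases abs_cases (a - x') with ⟨h3, _⟩ | ⟨h3, _⟩ <;>
  rcases abs_cases (b - x') with ⟨h4, _⟩ | ⟨h4, _⟩ <;> omega

lemma pv_sorted_getD {S : List Int} (hS : S.Pairwise (· ≤ ·)) {k l : Nat}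
    (hkl : k ≤ l) (hl : l < S.length) : S.getD k 0 ≤ S.getD l 0 := by
  rw [List.getD_eq_getElem S 0 (lt_of_le_of_lt hkl hl), List.getD_eq_getElem S 0 hl]
  rcases Nat.eq_or_lt_of_le hkl with rfl | hkl
  · exact le_refl _
  · exact (List.pairwise_iff_getElem.mp hS) k l _ _ hkl

-- the inner while-loop lands on a nearest heater for x
lemma heaterInner_spec (S : List Int) (hS : S.Pairwise (· ≤ ·)) (x : Int) :
    ∀ j, j < S.length →
      (∀ k < j, |S.getD j 0 - x| ≤ |S.getD k 0 - x|) →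
      heaterInner S x j < S.length ∧
      (∀ k < S.length, |S.getD (heaterInner S x j) 0 - x| ≤ |S.getD k 0 - x|) := by
  intro j
  induction j using (heaterInner.induct S x) with
  | case1 j hcond ih =>
      intro hj hinv
      rw [heaterInner, dif_pos hcond]
      refine ih hcond.1 ?_
      intro k hk
      rcases Nat.lt_or_ge k j with hkj | hkj
      · exact le_trans hcond.2 (hinv k hkj)
      · have : k = j := by omega
        subst this; exact hcond.2
  | case2 j hcond =>
      intro hj hinv
      rw [heaterInner, dif_neg hcond]
      refine ⟨hj, ?_⟩
      intro k hk
      rcases Nat.lt_or_ge k j with hkj | hkj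
      · exact hinv k hkj
      · rcases Nat.eq_or_lt_of_le hkj with rfl | hkj
        · exact le_refl _
        · -- k ≥ j+1: the loop stopped, so j+1 ≥ len (impossible) or dist grew at j+1
          have hj1 : j + 1 < S.length := by omega
          have hgrow : |S.getD j 0 - x| < |S.getD (j+1) 0 - x| := by
            by_contra hle
            exact hcond ⟨hj1, by omega⟩
          have h1 : S.getD j 0 ≤ S.getD (j+1) 0 := pv_sorted_getD hS (by omega) hj1
          have h2 : S.getD (j+1) 0 ≤ S.getD k 0 := pv_sorted_getD hS (by omega) hk
          exact le_of_lt (pv_abs_grow _ _ _ x h1 h2 hgrow)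

-- a nearest heater's distance is exactly heaterBest
lemma heaterBest_eq (S : List Int) (x : Int) (j : Nat) (hj : j < S.length)
    (hmin : ∀ k < S.length, |S.getD j 0 - x| ≤ |S.getD k 0 - x|) :
    |S.getD j 0 - x| = heaterBest S x := by
  unfold heaterBest
  have hmem : |S.getD j 0 - x| ∈ S.map (fun ht => |ht - x|) := by
    rw [List.getD_eq_getElem S 0 hj]
    exact List.mem_map.mpr ⟨S[j], List.getElem_mem hj, rfl⟩
  cases hm : PySem.List.min? (S.map (fun ht => |ht - x|)) (fun y => y) with
  | none =>
      rw [(PySem.List.min?_eq_none_iff _ _).mp hm] at hmem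
      simp at hmem
  | some m =>
      have hmm := PySem.List.min?_mem hm
      have hle : m ≤ |S.getD j 0 - x| := PySem.List.min?_isMin hm _ hmem
      rcases List.mem_map.mp hmm with ⟨ht, hht, rfl⟩
      rcases List.mem_iff_getElem.mp hht with ⟨k, hk, rfl⟩
      have h2 := hmin k hk
      rw [List.getD_eq_getElem S 0 hk] at h2
      simp only [Option.getD_some]
      omega

-- the outer loop computes the running max of heaterBest over the remaining (sorted) houses
lemma heaterLoop_spec (S : List Int) (hS : S.Pairwise (· ≤ ·)) :
    ∀ (H : List Int), H.Pairwise (· ≤ ·) → ∀ (j : Nat) (res : Int), j < S.length →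
      (∀ x ∈ H, ∀ k < j, |S.getD j 0 - x| ≤ |S.getD k 0 - x|) →
      heaterLoop S H j res = H.foldl (fun r x => max r (heaterBest S x)) res := by
  intro H
  induction H with
  | nil => intro _ j res _ _; rfl
  | cons x rest ih =>
      intro hH j res hj hinv
      have hspec := heaterInner_spec S hS x j hj (hinv x (by simp))
      set j' := heaterInner S x j with hj'
      have hbest : |S.getD j' 0 - x| = heaterBest S x :=
        heaterBest_eq S x j' hspec.1 hspec.2
      show heaterLoop S (x :: rest) j res = _
      rw [heaterLoop]
      simp only [← hj', hbest, List.foldl_cons]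
      refine ih (List.Pairwise.sublist (List.sublist_cons_self x rest) hH) j' _ hspec.1 ?_
      intro x' hx' k hk
      have hxx' : x ≤ x' := (List.pairwise_cons.mp hH).1 x' hx'
      have hk' : S.getD k 0 ≤ S.getD j' 0 := pv_sorted_getD hS (le_of_lt hk) hspec.1
      have hatx : |S.getD j' 0 - x| ≤ |S.getD k 0 - x| := hspec.2 k (lt_trans hk hspec.1)
      exact pv_abs_shift _ _ _ _ hk' hxx' hatx

lemma heaterBest_nonneg (S : List Int) (x : Int) : 0 ≤ heaterBest S x := by
  unfold heaterBest
  cases hm : PySem.List.min? (S.map (fun ht => |ht - x|)) (fun y => y) with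
  | none => simp
  | some m =>
      have := PySem.List.min?_mem hm
      rcases List.mem_map.mp this with ⟨ht, _, rfl⟩
      simp [abs_nonneg]

-- ===== VERDICT (by name: the statement is the Claim_ definition above) =====
theorem heater_rad_spec : Claim_equal_heater_rad := by
  intro houses heaters _hdom hpre
  unfold Spec_heater_rad heater_rad heater_rad_alt
  set hs := PySem.List.sorted houses (fun x => x) false with hhs
  set ss := PySem.List.sorted heaters (fun x => x) false with hss
  have hSs : ss.Pairwise (· ≤ ·) := by
    simpa using PySem.List.sorted_pairwise heaters (fun x => x)
  have hHs : hs.Pairwise (· ≤ ·) := by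
    simpa using PySem.List.sorted_pairwise houses (fun x => x)
  cases hcase : hs with
  | nil => simp [heaterLoop]
  | cons x rest =>
      have hhne : houses ≠ [] := by
        intro h
        have h2 : hs = [] := by
          rw [hhs]; exact (PySem.List.sorted_eq_nil_iff houses (fun x => x) false).mpr h
        rw [hcase] at h2; simp at h2
      have htne : heaters ≠ [] := by
        rcases hpre with h | h
        · exact absurd h hhne
        · exact h
      have hsne : ss ≠ [] := by
        intro h2
        exact htne ((PySem.List.sorted_eq_nil_iff heaters (fun x => x) false).mp (hss ▸ h2))
      have hslen : 0 < ss.length := List.length_pos_iff.mpr hsne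
      rw [if_neg (by simp)]
      rw [hcase] at hHs
      rw [heaterLoop_spec ss hSs (x :: rest) hHs 0 0 hslen (by intro _ _ k hk; omega)]
      rw [List.map_cons, PySem.List.max?_id_cons]
      simp only [Option.getD_some, List.foldl_cons]
      rw [List.foldl_map]
      have h0 : max 0 (heaterBest ss x) = heaterBest ss x :=
        max_eq_right (heaterBest_nonneg ss x)
      rw [h0]
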